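-- pv_equiv track=rewrite | github.com/brunophg/Estrutura-de-dados | funções recursivas/tarefa02.py | somaRecursiva
-- ===== SOURCE A (Python) =====
-- def somaRecursiva(a, b):
--     def sucessor(a):
--         return a + 1
--
--     def antecessor(b):
--         return b - 1
--
--     if b == 0:
--         return a
--     return somaRecursiva(sucessor(a), antecessor(b))
-- ===== SOURCE B (Python) =====
-- def somaRecursiva(a, b):
--     return a + b
-- ===== Notes on version B (the rewrite author's own statement) =====
-- stated objective: faster
-- what changed: Replaces the unary successor/antecessor recursion with the closed form a + b (one machine addition, no recursion).
-- outside the precondition, e.g. on somaRecursiva(0, -1): A raises RecursionError, B returns -1; on somaRecursiva(0, 100000): A raises RecursionError, B returns 100000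
import Mathlib
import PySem

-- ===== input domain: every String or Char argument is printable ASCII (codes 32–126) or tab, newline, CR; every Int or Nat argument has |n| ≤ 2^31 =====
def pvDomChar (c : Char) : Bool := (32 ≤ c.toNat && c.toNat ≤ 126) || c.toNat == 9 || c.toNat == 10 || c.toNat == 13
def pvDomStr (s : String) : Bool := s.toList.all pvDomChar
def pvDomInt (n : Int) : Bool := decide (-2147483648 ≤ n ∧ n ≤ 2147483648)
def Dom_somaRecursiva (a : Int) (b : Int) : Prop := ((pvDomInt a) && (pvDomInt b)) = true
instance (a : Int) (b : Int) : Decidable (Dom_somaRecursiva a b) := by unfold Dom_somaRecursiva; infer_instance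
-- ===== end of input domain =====

-- B replaces A's unary successor/antecessor recursion by the closed form a + b.

-- ===== PORT A =====
-- A recurses with a+1, b-1 until b = 0.  For b < 0 Python recurses without ever
-- reaching 0 (RecursionError); Pre_ excludes that, so the else-branch value for
-- b < 0 (arbitrary: a) is never claimed.  Recursion measured by b.toNat.
def somaRecursiva (a : Int) (b : Int) : Int :=
  if h : b = 0 then a
  else if h2 : 0 < b then somaRecursiva (a + 1) (b - 1)
  else a
termination_by b.toNat
decreasing_by omega

-- ===== PORT B =====
def somaRecursiva_alt (a : Int) (b : Int) : Int := a + b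

-- ===== PRECONDITION & SPEC =====
-- Pre_ excludes b < 0 (A recurses forever until RecursionError) and b > 900
-- (A exceeds CPython's default recursion limit and raises RecursionError).
def Pre_somaRecursiva (a : Int) (b : Int) : Prop := 0 ≤ b ∧ b ≤ 900
instance (a : Int) (b : Int) : Decidable (Pre_somaRecursiva a b) := by unfold Pre_somaRecursiva; infer_instance
def pvWitness_somaRecursiva : Int × Int := (3, 5)

def Spec_somaRecursiva (a : Int) (b : Int) (out : Int) : Prop := out = somaRecursiva_alt a b
instance (a : Int) (b : Int) (out : Int) : Decidable (Spec_somaRecursiva a b out) := by unfold Spec_somaRecursiva; infer_instance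

-- ===== CLAIM (what is proved, stated in full; the proofs are below) =====
def Claim_equal_somaRecursiva : Prop := ∀ (a : Int) (b : Int), Dom_somaRecursiva a b → Pre_somaRecursiva a b → Spec_somaRecursiva a b (somaRecursiva a b)

-- ===== LEMMAS AND PROOFS =====
theorem somaRecursiva_eq_add (a b : Int) (hb : 0 ≤ b) : somaRecursiva a b = a + b := by
  obtain ⟨n, rfl⟩ := Int.eq_ofNat_of_zero_le hb
  induction n generalizing a with
  | zero => simp [somaRecursiva]
  | succ k ih =>
      rw [somaRecursiva, dif_neg (by omega), dif_pos (by omega)]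
      have hc : ((k + 1 : ℕ) : ℤ) - 1 = (k : ℤ) := by push_cast; ring
      rw [hc, ih _ (by positivity)]
      push_cast; ring

-- ===== VERDICT (by name: the statement is the Claim_ definition above) =====
theorem somaRecursiva_spec : Claim_equal_somaRecursiva := by
  intro a b _ hpre
  unfold Spec_somaRecursiva somaRecursiva_alt
  exact somaRecursiva_eq_add a b hpre.1
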